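-- pv_equiv track=rewrite | github.com/c-tel/Information-Retrieval | index_creation/merge_indexes.py | __mins
-- ===== SOURCE A (Python) =====
-- def __mins(lines):
--     if not lines:
--         return []
--     words = [line[:line.find(' ')] for line in lines]
--     cur_min = words[0]
--     for word in words:
--         if word < cur_min:
--             cur_min = word
--     res = []
--     for i in range(len(words)):
--         if words[i] == cur_min:
--             res.append(i)
--     return res
-- ===== SOURCE B (Python) =====
-- def __mins(lines):
--     if not lines:
--         return []
--     words = [line[:line.find(' ')] for line in lines]
--     cur_min = words[0]
--     res = [0]
--     for i, w in enumerate(words[1:], 1):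
--         if w < cur_min:
--             cur_min = w
--             res = [i]
--         elif w == cur_min:
--             res.append(i)
--     return res
-- ===== Notes on version B (the rewrite author's own statement) =====
-- stated objective: alternative
-- what changed: Replaces A's find-the-minimum pass followed by a separate collect-all-matching-indices pass with a single incremental pass that maintains both the running minimum prefix and the list of indices achieving it (reset on strictly smaller, append on equal).
import Mathlib
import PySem

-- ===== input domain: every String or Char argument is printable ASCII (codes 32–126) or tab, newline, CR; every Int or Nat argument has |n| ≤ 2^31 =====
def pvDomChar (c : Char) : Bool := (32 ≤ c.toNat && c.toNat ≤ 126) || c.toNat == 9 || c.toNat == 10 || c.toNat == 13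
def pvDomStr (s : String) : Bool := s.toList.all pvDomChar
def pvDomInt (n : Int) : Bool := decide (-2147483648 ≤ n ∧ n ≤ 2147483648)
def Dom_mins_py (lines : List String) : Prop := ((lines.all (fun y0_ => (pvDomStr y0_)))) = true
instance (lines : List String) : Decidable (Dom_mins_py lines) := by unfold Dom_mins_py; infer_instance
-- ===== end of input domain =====

-- B is an alternative single-pass implementation (running minimum + its index list maintained together); return-value equivalence proved.

-- prefix of a line: line[:line.find(' ')]  (shared by both sources as the identical comprehension)
def pvPref (line : String) : String :=
  PySem.Str.slice line none (some (PySem.Str.find line " "))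

-- ===== PORT A =====
-- running-minimum step of A's first loop
def pvMStep (cm w : String) : String := if w < cm then w else cm

def mins_py (lines : List String) : List Int :=
  if lines = [] then []
  else
    let words := lines.map pvPref
    let cur_min := words.foldl pvMStep (PySem.List.pyGetD words 0 "")
    (PySem.List.pyRange 0 (words.length : Int) 1).foldl
      (fun res i => if PySem.List.pyGetD words i "" = cur_min then res ++ [i] else res) []

-- ===== PORT B =====
-- body of B's single loop: reset the index list on a strictly smaller prefix, extend it on an equal one
def pvBStep (st : String × List Int) (p : Int × String) : String × List Int :=
  if p.2 < st.1 then (p.2, [p.1])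
  else if p.2 = st.1 then (st.1, st.2 ++ [p.1])
  else st

def mins_py_alt (lines : List String) : List Int :=
  match lines with
  | [] => []
  | l :: ls =>
    let words := pvPref l :: ls.map pvPref
    let st := (PySem.List.enumerate (PySem.List.slice words (some 1) none) 1).foldl
        pvBStep (pvPref l, [0])
    st.2

-- ===== PRECONDITION & SPEC =====
def Spec_mins_py (lines : List String) (out : List Int) : Prop := out = mins_py_alt lines
instance (lines : List String) (out : List Int) : Decidable (Spec_mins_py lines out) := by unfold Spec_mins_py; infer_instance

-- ===== CLAIM (what is proved, stated in full; the proofs are below) =====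
def Claim_equal_mins_py : Prop := ∀ (lines : List String), Dom_mins_py lines → Spec_mins_py lines (mins_py lines)

-- ===== LEMMAS AND PROOFS =====

-- indices (offset k) at which ws carries the value m
def pvIdxOf (ws : List String) (k : Int) (m : String) : List Int :=
  ((PySem.List.enumerate ws k).filter (fun p => p.2 == m)).map (·.1)

lemma pvIdxOf_nil (k : Int) (m : String) : pvIdxOf [] k m = [] := rfl

lemma pvIdxOf_cons (w : String) (ws : List String) (k : Int) (m : String) :
    pvIdxOf (w :: ws) k m = (if w = m then [k] else []) ++ pvIdxOf ws (k + 1) m := by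
  simp [pvIdxOf, PySem.List.enumerate_cons, List.filter_cons]
  by_cases h : w = m <;> simp [h]

lemma foldl_mstep_le (ws : List String) (c : String) : ws.foldl pvMStep c ≤ c := by
  induction ws generalizing c with
  | nil => simp
  | cons w ws ih =>
      refine le_trans (ih (pvMStep c w)) ?_
      unfold pvMStep
      split_ifs with h
      · exact le_of_lt h
      · exact le_rfl

lemma bloop (ws : List String) (k : Int) (c : String) (r : List Int) :
    (PySem.List.enumerate ws k).foldl pvBStep (c, r)
      = (ws.foldl pvMStep c,
         (if ws.foldl pvMStep c = c then r else []) ++ pvIdxOf ws k (ws.foldl pvMStep c)) := by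
  induction ws generalizing k c r with
  | nil => simp [pvIdxOf_nil]
  | cons w ws ih =>
      rw [PySem.List.enumerate_cons, List.foldl_cons]
      by_cases hlt : w < c
      · have hm : (w :: ws).foldl pvMStep c = ws.foldl pvMStep w := by
          simp [List.foldl_cons, pvMStep, hlt]
        have step : pvBStep (c, r) (k, w) = (w, [k]) := by simp [pvBStep, hlt]
        rw [step, ih]
        have hne : ws.foldl pvMStep w ≠ c := fun h => by
          have := foldl_mstep_le ws w; rw [h] at this
          exact absurd (lt_of_le_of_lt this hlt) (lt_irrefl c)
        rw [hm, pvIdxOf_cons, if_neg hne]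
        by_cases hw : ws.foldl pvMStep w = w
        · simp [hw]
        · have : ¬ w = ws.foldl pvMStep w := fun h => hw h.symm
          simp [hw, this]
      · have hm : (w :: ws).foldl pvMStep c = ws.foldl pvMStep c := by
          simp [List.foldl_cons, pvMStep, hlt]
        by_cases heq : w = c
        · have step : pvBStep (c, r) (k, w) = (c, r ++ [k]) := by simp [pvBStep, heq]
          rw [step, ih, hm, pvIdxOf_cons]
          by_cases hc : ws.foldl pvMStep c = c
          · have : w = ws.foldl pvMStep c := by rw [hc, heq]
            simp [hc, this]
          · have : ¬ w = ws.foldl pvMStep c := fun h => hc (by rw [← h, heq])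
            simp [hc, this]
        · have step : pvBStep (c, r) (k, w) = (c, r) := by simp [pvBStep, hlt, heq]
          rw [step, ih, hm, pvIdxOf_cons]
          have hwm : ¬ w = ws.foldl pvMStep c := by
            intro h
            have hle : w ≤ c := h ▸ foldl_mstep_le ws c
            exact hlt (lt_of_le_of_ne hle heq)
          simp [hwm]

-- A's second loop collects exactly pvIdxOf over the whole word list
lemma aloop (xs : List String) (m : String) :
    (PySem.List.pyRange 0 (xs.length : Int) 1).foldl
        (fun res i => if PySem.List.pyGetD xs i "" = m then res ++ [i] else res) []
      = pvIdxOf xs 0 m := by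
  rw [PySem.List.foldl_append_ite_eq_filter]
  rw [pvIdxOf, PySem.List.enumerate_eq_map_pyRange xs ""]
  rw [List.filter_map, List.map_map]
  simp only [Function.comp_def, List.map_id']
  exact List.filter_congr (fun x _ => by by_cases h : PySem.List.pyGetD xs x "" = m <;> simp [h])

-- ===== VERDICT (by name: the statement is the Claim_ definition above) =====
theorem mins_py_spec : Claim_equal_mins_py := by
  intro lines _
  unfold Spec_mins_py mins_py mins_py_alt
  match lines with
  | [] => rfl
  | l :: ls =>
      simp only [reduceCtorEq, if_false]
      rw [PySem.List.slice_from_one]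
      have htail : (pvPref l :: ls.map pvPref).tail = ls.map pvPref := rfl
      rw [htail, bloop]
      have h0 : PySem.List.pyGetD (pvPref l :: ls.map pvPref) 0 "" = pvPref l := by
        simp [PySem.List.pyGetD_zero_cons]
      have hm : (pvPref l :: ls.map pvPref).foldl pvMStep (pvPref l)
          = (ls.map pvPref).foldl pvMStep (pvPref l) := by
        simp [List.foldl_cons, pvMStep]
      rw [List.map_cons, h0, hm, aloop, pvIdxOf_cons]
      by_cases hc : (ls.map pvPref).foldl pvMStep (pvPref l) = pvPref l
      · simp [hc]
      · have : ¬ pvPref l = (ls.map pvPref).foldl pvMStep (pvPref l) := fun h => hc h.symm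
        simp [hc, this]
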